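-- pv_equiv track=rewrite | github.com/andreiionut1411/Minesweeper | main.py | init_player_board
-- ===== SOURCE A (Python) =====
-- def init_player_board (size):
--     player_board = [[2 for i in range(2 * size + 1)] for j in range(2 * size + 1)]
--
--     for i in range(2 * size + 1):
--         for j in range(2 * size + 1):
--             if i % 2 == 0:
--                 player_board [i][j] = 10
--             elif j % 2 == 0:
--                 player_board [i][j] = 11
--             else:
--                 player_board [i][j] = 12
--
--     return  player_board
-- ===== SOURCE B (Python) =====
-- def init_player_board(size):
--     n = 2 * size + 1
--     even_row = [10] * n
--     odd_row = [11 if j % 2 == 0 else 12 for j in range(n)]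
--     return [list(even_row) if i % 2 == 0 else list(odd_row) for i in range(n)]
-- ===== Notes on version B (the rewrite author's own statement) =====
-- stated objective: simpler
-- what changed: Instead of allocating a board of 2s and then overwriting every cell with a per-cell three-way branch in a nested loop, B precomputes the two prototype rows (all-10 and alternating 11/12) once and builds the board with a single row-level loop that copies the matching prototype.
import Mathlib
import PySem

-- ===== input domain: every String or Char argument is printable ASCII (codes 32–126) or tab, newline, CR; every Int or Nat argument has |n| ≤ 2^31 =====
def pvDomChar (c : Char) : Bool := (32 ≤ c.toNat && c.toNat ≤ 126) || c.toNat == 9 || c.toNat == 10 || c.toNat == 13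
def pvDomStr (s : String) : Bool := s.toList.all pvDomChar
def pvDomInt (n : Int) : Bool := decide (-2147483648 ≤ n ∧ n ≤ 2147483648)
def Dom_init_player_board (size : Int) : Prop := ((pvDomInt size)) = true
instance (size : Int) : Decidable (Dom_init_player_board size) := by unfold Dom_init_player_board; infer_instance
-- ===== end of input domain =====

-- B replaces A's cell-by-cell overwrite of a board of 2s with two precomputed prototype rows
-- copied by row parity (objective: simpler).

-- ===== PORT A =====
def init_player_board (size : Int) : List (List Int) :=
  let r := PySem.List.pyRange 0 (2 * size + 1) 1
  let board : List (List Int) := r.map (fun _j => r.map (fun _i => (2 : Int)))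
  r.foldl (fun b i =>
    r.foldl (fun b j =>
      if i % 2 == 0 then b.modify i.toNat (fun row => row.set j.toNat 10)
      else if j % 2 == 0 then b.modify i.toNat (fun row => row.set j.toNat 11)
      else b.modify i.toNat (fun row => row.set j.toNat 12)) b) board

-- ===== PORT B =====
def init_player_board_alt (size : Int) : List (List Int) :=
  let n := 2 * size + 1
  let evenRow : List Int := List.replicate n.toNat 10
  let oddRow : List Int := (PySem.List.pyRange 0 n 1).map (fun j => if j % 2 == 0 then (11 : Int) else 12)
  (PySem.List.pyRange 0 n 1).map (fun i => if i % 2 == 0 then evenRow else oddRow)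

-- ===== PRECONDITION & SPEC =====
def Spec_init_player_board (size : Int) (out : List (List Int)) : Prop := out = init_player_board_alt size
instance (size : Int) (out : List (List Int)) : Decidable (Spec_init_player_board size out) := by unfold Spec_init_player_board; infer_instance

-- ===== CLAIM (what is proved, stated in full; the proofs are below) =====
def Claim_equal_init_player_board : Prop := ∀ (size : Int), Dom_init_player_board size → Spec_init_player_board size (init_player_board size)

-- ===== LEMMAS AND PROOFS =====

-- the cell value A writes at row index i, column index j
def pvCell (i j : Int) : Int := if i % 2 == 0 then 10 else if j % 2 == 0 then 11 else 12

theorem pv_foldl_set_getElem? (g : Nat → Int) (js : List Nat) (l : List Int) (k : Nat) :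
    (js.foldl (fun row j => row.set j (g j)) l)[k]? =
      if k ∈ js ∧ k < l.length then some (g k) else l[k]? := by
  induction js generalizing l with
  | nil => simp
  | cons j js ih =>
    rw [List.foldl_cons, ih]
    simp only [List.length_set, List.getElem?_set, List.mem_cons]
    by_cases hj : k = j
    · subst hj
      by_cases hm : k ∈ js <;> by_cases hl : k < l.length <;> simp [hm, hl]
    · by_cases hm : k ∈ js <;> by_cases hl : k < l.length <;>
        simp [hj, Ne.symm hj, hm, hl]

theorem pv_set_all (g : Nat → Int) (l : List Int) :
    (List.range l.length).foldl (fun row j => row.set j (g j)) l =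
      (List.range l.length).map g := by
  apply List.ext_getElem?
  intro k
  rw [pv_foldl_set_getElem?]
  by_cases h : k < l.length <;> simp [h]

theorem pv_foldl_modify_getElem? (R : Nat → List Int → List Int) (is : List Nat)
    (b : List (List Int)) (k : Nat) (hnd : is.Nodup) :
    (is.foldl (fun b i => b.modify i (R i)) b)[k]? =
      if k ∈ is then (b[k]?).map (R k) else b[k]? := by
  induction is generalizing b with
  | nil => simp
  | cons i is ih =>
    rw [List.foldl_cons, ih _ (List.Nodup.of_cons hnd)]
    simp only [List.mem_cons, List.getElem?_modify]
    by_cases hm : k ∈ is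
    · have hne : i ≠ k := by rintro rfl; exact (List.nodup_cons.mp hnd).1 hm
      simp only [hm, or_true, if_pos]
      cases b[k]? <;> simp [hne]
    · by_cases hi : k = i
      · subst hi; simp only [hm, if_false, true_or, if_pos]
        cases b[k]? <;> simp
      · simp only [hm, hi, false_or, if_neg, not_false_iff]
        cases b[k]? <;> simp [Ne.symm hi]

theorem pv_modify_id (i : Nat) (b : List (List Int)) :
    (b.modify i (fun row => row)) = b := by
  apply List.ext_getElem?
  intro k
  simp only [List.getElem?_modify]
  cases b[k]? <;> simp

theorem pv_foldl_modify_comm {α : Type} (i : Nat) (f : α → List Int → List Int)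
    (js : List α) (b : List (List Int)) :
    js.foldl (fun b j => b.modify i (fun row => f j row)) b =
      b.modify i (fun row => js.foldl (fun row j => f j row) row) := by
  induction js generalizing b with
  | nil => simp [pv_modify_id]
  | cons j js ih =>
    rw [List.foldl_cons, ih]
    simp only [List.foldl_cons]
    apply List.ext_getElem?
    intro k
    simp only [List.getElem?_modify]
    cases b[k]? <;> simp <;> split <;> simp

theorem pv_inner (m : Nat) (ki : Nat) (b : List (List Int)) :
    List.foldl (fun (b : List (List Int)) (kj : Nat) =>
      if ((ki : Int)) % 2 == 0 then b.modify ((ki : Int)).toNat (fun row => row.set ((kj : Int)).toNat 10)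
      else if ((kj : Int)) % 2 == 0 then b.modify ((ki : Int)).toNat (fun row => row.set ((kj : Int)).toNat 11)
      else b.modify ((ki : Int)).toNat (fun row => row.set ((kj : Int)).toNat 12)) b (List.range m)
    = b.modify ki (fun row =>
        (List.range m).foldl (fun row kj => row.set kj (pvCell (ki : Int) (kj : Int))) row) := by
  have hf : (fun (b : List (List Int)) (kj : Nat) =>
      if ((ki : Int)) % 2 == 0 then b.modify ((ki : Int)).toNat (fun row => row.set ((kj : Int)).toNat 10)
      else if ((kj : Int)) % 2 == 0 then b.modify ((ki : Int)).toNat (fun row => row.set ((kj : Int)).toNat 11)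
      else b.modify ((ki : Int)).toNat (fun row => row.set ((kj : Int)).toNat 12)) =
      (fun (b : List (List Int)) (kj : Nat) =>
        b.modify ki (fun row => row.set kj (pvCell (ki : Int) (kj : Int)))) := by
    funext b kj
    simp only [Int.toNat_natCast, pvCell]
    split <;> [rfl; split <;> rfl]
  rw [hf, pv_foldl_modify_comm]

-- ===== VERDICT (by name: the statement is the Claim_ definition above) =====
theorem init_player_board_spec : Claim_equal_init_player_board := by
  intro size _
  unfold Spec_init_player_board init_player_board init_player_board_alt
  simp only [PySem.List.pyRange_one, Int.sub_zero, Int.zero_add, List.foldl_map, List.map_map]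
  set m := (2 * size + 1).toNat with hm
  have houter : (fun (b : List (List Int)) (ki : Nat) =>
      List.foldl (fun (b : List (List Int)) (kj : Nat) =>
        if ((ki : Int)) % 2 == 0 then b.modify ((ki : Int)).toNat (fun row => row.set ((kj : Int)).toNat 10)
        else if ((kj : Int)) % 2 == 0 then b.modify ((ki : Int)).toNat (fun row => row.set ((kj : Int)).toNat 11)
        else b.modify ((ki : Int)).toNat (fun row => row.set ((kj : Int)).toNat 12)) b (List.range m)) =
      (fun (b : List (List Int)) (ki : Nat) =>
        b.modify ki (fun row =>
          (List.range m).foldl (fun row kj => row.set kj (pvCell (ki : Int) (kj : Int))) row)) := by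
    funext b ki
    exact pv_inner m ki b
  rw [houter]
  apply List.ext_getElem?
  intro k
  rw [pv_foldl_modify_getElem? _ _ _ _ (List.nodup_range)]
  by_cases hk : k < m
  · simp only [List.mem_range, hk, if_pos, List.getElem?_map, List.getElem?_range,
      Option.map_some, Function.comp_def]
    have hrow : (List.map (fun (_ : Nat) => (2 : Int)) (List.range m)).length = m := by simp
    have hall : (List.range m).foldl
        (fun row kj => row.set kj (pvCell (k : Int) (kj : Int)))
        (List.map (fun (_ : Nat) => (2 : Int)) (List.range m)) =
        (List.range m).map (fun (kj : Nat) => pvCell (k : Int) (kj : Int)) := by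
      have h2 := pv_set_all (fun (kj : Nat) => pvCell (k : Int) (kj : Int))
        (List.map (fun (_ : Nat) => (2 : Int)) (List.range m))
      rwa [hrow] at h2
    congr 1
    rw [hall]
    by_cases hpar : ((k : Int)) % 2 == 0
    · simp only [hpar, if_pos, pvCell]
      simp
    · simp only [pvCell, hpar]
      simp
  · simp [hk]
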